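-- pv_equiv track=rewrite | github.com/trung-hn/leetcode-solutions | src/1807.evaluate-the-bracket-pairs-of-a-string.py | evaluate
-- ===== SOURCE A (Python) =====
-- from typing import List
-- from collections import defaultdict
--
-- def evaluate(s: str, knowledge: List[List[str]]) -> str:
--     known = defaultdict(lambda: "?", knowledge)
--     rv = []
--     curr = ""
--     for c in s:
--         if c == ")":
--             rv.append(known[curr[1:]])
--             curr = ""
--         elif c == "(" or curr:
--             curr += c
--         else:
--             rv.append(c)
--     return "".join(rv)
-- ===== SOURCE B (Python) =====
-- def evaluate(s, knowledge):
--     known = dict(knowledge)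
--     parts = s.split(')')
--     out = []
--     for part in parts[:-1]:
--         pre, _, key = part.partition('(')
--         out.append(pre)
--         out.append(known.get(key, '?'))
--     pre, _, _ = parts[-1].partition('(')
--     out.append(pre)
--     return ''.join(out)
-- ===== Notes on version B (the rewrite author's own statement) =====
-- stated objective: simpler
-- what changed: A is a character-at-a-time state machine carrying a 'currently inside brackets' buffer; B splits s on ')' once and handles each piece with a single partition on '('.
import Mathlib
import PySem

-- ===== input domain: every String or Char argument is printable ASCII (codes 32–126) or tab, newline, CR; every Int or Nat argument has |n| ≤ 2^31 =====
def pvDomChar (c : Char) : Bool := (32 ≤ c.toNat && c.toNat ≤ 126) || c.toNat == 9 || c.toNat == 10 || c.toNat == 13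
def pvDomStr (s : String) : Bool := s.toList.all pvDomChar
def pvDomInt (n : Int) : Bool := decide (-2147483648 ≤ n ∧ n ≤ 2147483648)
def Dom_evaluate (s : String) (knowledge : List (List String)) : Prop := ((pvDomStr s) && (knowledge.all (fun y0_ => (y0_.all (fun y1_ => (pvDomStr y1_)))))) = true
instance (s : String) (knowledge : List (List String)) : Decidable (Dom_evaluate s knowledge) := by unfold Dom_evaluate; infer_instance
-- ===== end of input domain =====

-- B replaces A's character-by-character state machine by split-on-')' + partition-on-'(' per piece (objective: simpler).

-- ===== PORT A =====
-- dict(knowledge): each entry is a 2-element list (guaranteed by Pre_evaluate; Python raises otherwise)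
def pvPairs (knowledge : List (List String)) : List (List Char × List Char) :=
  knowledge.map (fun kv => ((kv.headD "").toList, ((kv.drop 1).headD "").toList))

def evaluate (s : String) (knowledge : List (List String)) : String :=
  let known := PySem.Dict.ofList (pvPairs knowledge)
  let r := s.toList.foldl (fun (st : List (List Char) × List Char) (c : Char) =>
    if c = ')' then (st.1 ++ [known.getD (st.2.drop 1) ['?']], ([] : List Char))
    else if c = '(' ∨ st.2 ≠ [] then (st.1, st.2 ++ [c])
    else (st.1 ++ [[c]], st.2)) ([], [])
  String.ofList (PySem.Chars.join [] r.1)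

-- ===== PORT B =====
-- str.partition for a one-character separator — exact: (before first sep, sep, after); all three empty-sep corners impossible here
def pvPartitionChar (p : List Char) (sep : Char) : List Char × List Char × List Char :=
  match p.dropWhile (· ≠ sep) with
  | [] => (p.takeWhile (· ≠ sep), [], [])
  | _ :: rest => (p.takeWhile (· ≠ sep), [sep], rest)

def evaluate_alt (s : String) (knowledge : List (List String)) : String :=
  let known := PySem.Dict.ofList (pvPairs knowledge)
  let parts := PySem.Chars.splitOn s.toList [')']
  let out := parts.dropLast.foldl (fun out part =>
    let t := pvPartitionChar part '('
    out ++ [t.1, known.getD t.2.2 ['?']]) []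
  let t := pvPartitionChar (parts.getLastD []) '('
  String.ofList (PySem.Chars.join [] (out ++ [t.1]))

-- ===== PRECONDITION & SPEC =====
-- Pre_ excludes only knowledge entries that are not 2-element lists, on which Python's dict(knowledge) raises ValueError.
def Pre_evaluate (s : String) (knowledge : List (List String)) : Prop :=
  ∀ kv ∈ knowledge, kv.length = 2
instance (s : String) (knowledge : List (List String)) : Decidable (Pre_evaluate s knowledge) := by
  unfold Pre_evaluate; infer_instance

def pvWitness_evaluate : String × List (List String) := ("(name)is(age)yearsold", [["name", "bob"], ["age", "two"]])

def Spec_evaluate (s : String) (knowledge : List (List String)) (out : String) : Prop := out = evaluate_alt s knowledge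
instance (s : String) (knowledge : List (List String)) (out : String) : Decidable (Spec_evaluate s knowledge out) := by unfold Spec_evaluate; infer_instance

-- ===== CLAIM (what is proved, stated in full; the proofs are below) =====
def Claim_equal_evaluate : Prop := ∀ (s : String) (knowledge : List (List String)), Dom_evaluate s knowledge → Pre_evaluate s knowledge → Spec_evaluate s knowledge (evaluate s knowledge)

-- ===== LEMMAS AND PROOFS =====

-- simple structural recursion equal to splitOn · [')']
def pvSpl : List Char → List (List Char)
  | [] => [[]]
  | c :: cs => if c = ')' then [] :: pvSpl cs else (pvSpl cs).modifyHead (c :: ·)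

-- A's loop, as a recursion producing the joined output directly
def pvProcA (d : PySem.Dict (List Char) (List Char)) : List Char → List Char → List Char
  | [], _ => []
  | c :: cs, curr =>
    if c = ')' then d.getD (curr.drop 1) ['?'] ++ pvProcA d cs []
    else if c = '(' ∨ curr ≠ [] then pvProcA d cs (curr ++ [c])
    else c :: pvProcA d cs curr

-- B's loop over the parts, as a recursion producing the joined output directly
def pvProcB (d : PySem.Dict (List Char) (List Char)) : List (List Char) → List Char
  | [] => []
  | [p] => (pvPartitionChar p '(').1
  | p :: ps@(_ :: _) =>
    (pvPartitionChar p '(').1 ++ d.getD (pvPartitionChar p '(').2.2 ['?'] ++ pvProcB d ps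

-- A's behaviour when curr = '(' :: k : everything up to the next ')' extends the key
def pvAuxB (d : PySem.Dict (List Char) (List Char)) (k : List Char) : List (List Char) → List Char
  | [] => []
  | [_] => []
  | p :: ps@(_ :: _) => d.getD (k ++ p) ['?'] ++ pvProcB d ps

theorem pvSpl_ne_nil (cs : List Char) : pvSpl cs ≠ [] := by
  induction cs with
  | nil => simp [pvSpl]
  | cons c cs ih =>
    simp only [pvSpl]
    split
    · simp
    · cases h : pvSpl cs with
      | nil => exact absurd h ih
      | cons p ps => simp [List.modifyHead]

theorem pvJoin_nil (parts : List (List Char)) : PySem.Chars.join [] parts = parts.flatten := by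
  induction parts with
  | nil => rfl
  | cons p ps ih =>
    cases ps with
    | nil => simp [PySem.Chars.join_singleton]
    | cons q rest => rw [PySem.Chars.join_cons_cons]; simp [ih]

theorem pvSplitOn_go (fuel : Nat) (l cur : List Char) (acc : List (List Char))
    (h : l.length < fuel) :
    PySem.Chars.splitOn.go [')'] fuel l cur acc =
      acc.reverse ++ (pvSpl l).modifyHead (cur.reverse ++ ·) := by
  induction fuel generalizing l cur acc with
  | zero => omega
  | succ f ih =>
    cases l with
    | nil => simp [PySem.Chars.splitOn.go, pvSpl, List.modifyHead]
    | cons c rest =>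
      rw [PySem.Chars.splitOn.go]
      by_cases hc : c = ')'
      · subst hc
        simp only [List.isPrefixOf, BEq.rfl, Bool.true_and, if_pos]
        rw [ih _ _ _ (by simpa using Nat.lt_of_succ_lt_succ h)]
        simp only [pvSpl, List.modifyHead]
        cases hsp : pvSpl rest with
        | nil => exact absurd hsp (pvSpl_ne_nil rest)
        | cons p ps => simp [hsp]
      · have : ([')'].isPrefixOf (c :: rest)) = false := by
          simp [List.isPrefixOf]; exact fun hh => absurd hh.symm hc
        rw [if_neg (by simp [this])]
        rw [ih _ _ _ (by simpa using Nat.lt_of_succ_lt_succ h)]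
        simp only [pvSpl, if_neg hc]
        cases hsp : pvSpl rest with
        | nil => exact absurd hsp (pvSpl_ne_nil rest)
        | cons p ps => simp [List.modifyHead]

theorem pvSplitOn_eq (cs : List Char) : PySem.Chars.splitOn cs [')'] = pvSpl cs := by
  rw [PySem.Chars.splitOn, pvSplitOn_go _ _ _ _ (by omega)]
  cases hsp : pvSpl cs with
  | nil => exact absurd hsp (pvSpl_ne_nil cs)
  | cons p ps => simp [List.modifyHead]

theorem pvPartition_cons_ne (c sep : Char) (p : List Char) (h : c ≠ sep) :
    pvPartitionChar (c :: p) sep =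
      (c :: (pvPartitionChar p sep).1, (pvPartitionChar p sep).2) := by
  simp only [pvPartitionChar, List.dropWhile_cons, List.takeWhile_cons, h, decide_true,
    if_pos, ne_eq, not_false_iff]
  cases hd : p.dropWhile (· ≠ sep) <;> simp

theorem pvPartition_cons_self (sep : Char) (p : List Char) :
    pvPartitionChar (sep :: p) sep = ([], [sep], p) := by
  simp [pvPartitionChar]

theorem pvFoldA (d : PySem.Dict (List Char) (List Char)) (cs : List Char)
    (rv : List (List Char)) (curr : List Char) :
    (cs.foldl (fun (st : List (List Char) × List Char) (c : Char) =>
      if c = ')' then (st.1 ++ [d.getD (st.2.drop 1) ['?']], ([] : List Char))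
      else if c = '(' ∨ st.2 ≠ [] then (st.1, st.2 ++ [c])
      else (st.1 ++ [[c]], st.2)) (rv, curr)).1.flatten
    = rv.flatten ++ pvProcA d cs curr := by
  induction cs generalizing rv curr with
  | nil => simp [pvProcA]
  | cons c cs ih =>
    simp only [List.foldl_cons, pvProcA]
    by_cases h1 : c = ')'
    · simp only [h1, ih]; simp
    · by_cases h2 : c = '(' ∨ curr ≠ []
      · simp only [if_neg h1, if_pos h2, ih]
      · simp only [if_neg h1, if_neg h2, ih]; simp

theorem pvFoldB (d : PySem.Dict (List Char) (List Char)) (parts : List (List Char))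
    (out : List (List Char)) (hne : parts ≠ []) :
    ((parts.dropLast.foldl (fun out part =>
        out ++ [(pvPartitionChar part '(').1, d.getD (pvPartitionChar part '(').2.2 ['?']]) out)
      ++ [(pvPartitionChar (parts.getLastD []) '(').1]).flatten
    = out.flatten ++ pvProcB d parts := by
  induction parts generalizing out with
  | nil => exact absurd rfl hne
  | cons p ps ih =>
    cases ps with
    | nil => simp [pvProcB]
    | cons q qs =>
      have hd : (p :: q :: qs).dropLast = p :: (q :: qs).dropLast := rfl
      have hg : (p :: q :: qs).getLastD [] = (q :: qs).getLastD [] := by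
        simp [List.getLastD_cons]
      rw [hd, List.foldl_cons, hg, ih _ (by simp)]
      simp [pvProcB]

theorem pvMain (d : PySem.Dict (List Char) (List Char)) (cs : List Char) :
    (pvProcA d cs [] = pvProcB d (pvSpl cs)) ∧
    (∀ k, pvProcA d cs ('(' :: k) = pvAuxB d k (pvSpl cs)) := by
  induction cs with
  | nil =>
    constructor
    · simp [pvProcA, pvSpl, pvProcB, pvPartitionChar]
    · intro k; simp [pvProcA, pvSpl, pvAuxB]
  | cons c cs ih =>
    obtain ⟨ih1, ih2⟩ := ih
    obtain ⟨p, ps, hsp⟩ : ∃ p ps, pvSpl cs = p :: ps := by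
      cases h : pvSpl cs with
      | nil => exact absurd h (pvSpl_ne_nil cs)
      | cons p ps => exact ⟨p, ps, rfl⟩
    constructor
    · by_cases h1 : c = ')'
      · subst h1
        simp only [pvSpl, pvProcA, hsp]
        rw [ih1, hsp]
        simp [pvProcB, pvPartitionChar]
      · by_cases h2 : c = '('
        · subst h2
          have hA : pvProcA d ('(' :: cs) [] = pvProcA d cs ['('] := by
            simp [pvProcA]
          have hS : pvSpl ('(' :: cs) = ('(' :: p) :: ps := by
            simp [pvSpl, hsp, List.modifyHead]
          rw [hA, ih2 [], hsp, hS]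
          cases ps with
          | nil => simp [pvAuxB, pvProcB, pvPartition_cons_self]
          | cons q qs => simp [pvAuxB, pvProcB, pvPartition_cons_self]
        · have hA : pvProcA d (c :: cs) [] = c :: pvProcA d cs [] := by
            simp [pvProcA, h1, h2]
          have hS : pvSpl (c :: cs) = (c :: p) :: ps := by
            simp [pvSpl, h1, hsp, List.modifyHead]
          rw [hA, ih1, hsp, hS]
          cases ps with
          | nil => simp [pvProcB, pvPartition_cons_ne c '(' p h2]
          | cons q qs => simp [pvProcB, pvPartition_cons_ne c '(' p h2]
    · intro k
      by_cases h1 : c = ')'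
      · subst h1
        have hA : pvProcA d (')' :: cs) ('(' :: k) = d.getD k ['?'] ++ pvProcA d cs [] := by
          simp [pvProcA]
        have hS : pvSpl (')' :: cs) = [] :: p :: ps := by
          simp [pvSpl, hsp]
        rw [hA, ih1, hsp, hS]
        simp [pvAuxB]
      · have hA : pvProcA d (c :: cs) ('(' :: k) = pvProcA d cs ('(' :: (k ++ [c])) := by
          simp [pvProcA, h1]
        have hS : pvSpl (c :: cs) = (c :: p) :: ps := by
          simp [pvSpl, h1, hsp, List.modifyHead]
        rw [hA, ih2 (k ++ [c]), hsp, hS]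
        cases ps with
        | nil => simp [pvAuxB]
        | cons q qs => simp [pvAuxB]

-- ===== VERDICT (by name: the statement is the Claim_ definition above) =====
theorem evaluate_spec : Claim_equal_evaluate := by
  intro s knowledge _ _
  show evaluate s knowledge = evaluate_alt s knowledge
  unfold evaluate evaluate_alt
  dsimp only
  rw [pvJoin_nil, pvJoin_nil, pvFoldA, pvSplitOn_eq,
    pvFoldB _ _ _ (pvSpl_ne_nil s.toList)]
  simp [(pvMain (PySem.Dict.ofList (pvPairs knowledge)) s.toList).1]
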